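-- pv_equiv track=rewrite | github.com/tahabelkhouja/SRS | TSDTransform.py | scan_path
-- ===== SOURCE A (Python) =====
-- def scan_path(path):
--     '''
--     Find longest one-to-many alignments or sequential one-to-one alignemnts
--     '''
--     one_to_many = [0, 0] # [start, end]
--     many_to_one = [0, 0]
--     diag_seq = [0, 0]
--     scan = {
--         'one_to_many': [0, 0], # [start, end]
--         'many_to_one': [0, 0],
--         'diag_seq': [0, 0]
--         }
--     len_seq = lambda x: x[1]-x[0]
--     #look for one_to_many
--     i = 0
--     j = 1
--     while i < len(path[0]):
--         while (i+j < len(path[0]) and path[0][i]==path[0][i+j]):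
--             one_to_many = [i, i+j]
--             j += 1
--         if len_seq(one_to_many)!=0:
--             if len_seq(scan['one_to_many']) < len_seq(one_to_many):
--                 scan['one_to_many'] = one_to_many
--             one_to_many = [0, 0]
--             i = i+j
--             j = 1
--         else:
--             i += 1
--     #look for many_to_one
--     i = 0
--     j = 1
--     while i < len(path[1]):
--         while (i+j < len(path[1]) and path[1][i]==path[1][i+j]):
--             many_to_one = [i, i+j]
--             j += 1
--         if len_seq(many_to_one)!=0:
--             if len_seq(scan['many_to_one']) < len_seq(many_to_one):
--                 scan['many_to_one'] = many_to_one
--             many_to_one = [0, 0]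
--             i = i+j
--             j = 1
--         else:
--             i += 1
--     #look for diag_seq
--     i = 0
--     j = 0
--     while i < len(path[1]):
--         while (j+1 < len(path[1]) and path[0][j]==path[0][j+1]-1 and path[1][j]==path[1][j+1]-1):
--             diag_seq = [i, j+1]
--             j += 1
--         if len_seq(diag_seq)!=0:
--             if len_seq(scan['diag_seq']) < len_seq(diag_seq):
--                 scan['diag_seq'] = diag_seq
--             diag_seq = [0, 0]
--             i = j
--         else:
--             i += 1
--             j = i
--     return scan, [x for x in scan.keys()], [len_seq(scan[x]) for x in scan]
-- ===== SOURCE B (Python) =====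
-- def scan_path(path):
--     '''
--     Find longest one-to-many alignments or sequential one-to-one alignemnts
--     '''
--     def runs(seq):
--         # run-length encode seq in one pass: list of (start, length) of maximal
--         # runs of equal consecutive elements
--         out = []
--         start = 0
--         for k in range(1, len(seq)):
--             if seq[k] != seq[k - 1]:
--                 out.append((start, k - start))
--                 start = k
--         if seq:
--             out.append((start, len(seq) - start))
--         return out
--
--     def best_eq(seq):
--         # first run of length L >= 2 strictly longer than the current best,
--         # mapped to [s, s+L-1]; sentinel [0, 0]
--         best = [0, 0]
--         for s, L in runs(seq):
--             if L - 1 > best[1] - best[0]: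
--                 best = [s, s + L - 1]
--         return best
--
--     n1 = len(path[1])
--     steps = [path[0][k] == path[0][k + 1] - 1 and path[1][k] == path[1][k + 1] - 1
--              for k in range(n1 - 1)]
--     best_d = [0, 0]
--     for s, L in runs(steps):
--         if steps[s] and L > best_d[1] - best_d[0]:
--             best_d = [s, s + L]
--     scan = {'one_to_many': best_eq(path[0]),
--             'many_to_one': best_eq(path[1]),
--             'diag_seq': best_d}
--     return scan, list(scan.keys()), [e - s for s, e in scan.values()]
-- ===== Notes on version B (the rewrite author's own statement) =====
-- stated objective: simpler
-- what changed: Replaces A's three index-jumping nested while-loops by a single linear run-length encoding pass (runs of equal consecutive values for path[0]/path[1], runs of a precomputed boolean step array for the diagonal) followed by a fold that keeps the first strictly longer run.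
import Mathlib
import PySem

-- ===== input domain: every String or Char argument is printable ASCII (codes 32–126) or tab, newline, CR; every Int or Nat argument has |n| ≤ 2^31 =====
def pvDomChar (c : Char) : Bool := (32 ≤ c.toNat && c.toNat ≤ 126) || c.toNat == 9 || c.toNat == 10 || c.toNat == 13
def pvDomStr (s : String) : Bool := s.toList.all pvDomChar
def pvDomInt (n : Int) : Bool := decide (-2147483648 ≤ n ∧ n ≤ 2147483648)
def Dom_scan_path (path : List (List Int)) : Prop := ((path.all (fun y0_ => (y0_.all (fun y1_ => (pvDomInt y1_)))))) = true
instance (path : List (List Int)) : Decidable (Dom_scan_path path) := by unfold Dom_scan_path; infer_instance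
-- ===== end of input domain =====

-- B rewrites A's index-jumping nested while-loops as one run-length-encoding pass plus a fold
-- keeping the first strictly longer run (objective: simpler); equal return values on Pre_.

-- ===== PORT A =====
-- inner while of the one_to_many / many_to_one scans: extend j while path[?][i] == path[?][i+j],
-- carrying the current [start, end] pair. The loop is bounded by an explicit fuel counter
-- (q.length suffices: j strictly increases and the guard needs i + j < q.length), which makes
-- the while-loop a structural recursion computing exactly the same state.
def innerOtm (q : List Int) (fuel i j : Nat) (cur : Nat × Nat) : (Nat × Nat) × Nat :=
  match fuel with
  | 0 => (cur, j)
  | fuel + 1 =>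
    if i + j < q.length ∧ q.getD i 0 = q.getD (i + j) 0 then
      innerOtm q fuel i (j + 1) (i, i + j)
    else (cur, j)

-- outer while of the one_to_many / many_to_one scans; at each loop head one_to_many = [0,0] and
-- j = 1 (A re-establishes both before every outer test), so only i and the best pair are state;
-- fuel q.length suffices since i strictly increases and the guard needs i < q.length
def loopOtm (q : List Int) (fuel i : Nat) (best : Nat × Nat) : Nat × Nat :=
  match fuel with
  | 0 => best
  | fuel + 1 =>
    if i < q.length then
      if (innerOtm q q.length i 1 (0, 0)).1.2 - (innerOtm q q.length i 1 (0, 0)).1.1 ≠ 0 then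
        loopOtm q fuel (i + (innerOtm q q.length i 1 (0, 0)).2)
          (if best.2 - best.1 < (innerOtm q q.length i 1 (0, 0)).1.2 - (innerOtm q q.length i 1 (0, 0)).1.1
           then (innerOtm q q.length i 1 (0, 0)).1 else best)
      else loopOtm q fuel (i + 1) best
    else best

-- inner while of the diag_seq scan, carrying the current [start, end] pair; fuel p1.length
-- suffices since j strictly increases and the guard needs j + 1 < p1.length
def innerDiag (p0 p1 : List Int) (fuel i j : Nat) (cur : Nat × Nat) : (Nat × Nat) × Nat :=
  match fuel with
  | 0 => (cur, j)
  | fuel + 1 =>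
    if j + 1 < p1.length ∧ p0.getD j 0 = p0.getD (j + 1) 0 - 1 ∧ p1.getD j 0 = p1.getD (j + 1) 0 - 1 then
      innerDiag p0 p1 fuel i (j + 1) (i, j + 1)
    else (cur, j)

-- outer while of the diag_seq scan; at each loop head diag_seq = [0,0] and j = i (initially
-- i = j = 0; the then-branch sets i = j; the else-branch sets i += 1 then j = i), so only i
-- and the best pair are state; fuel p1.length suffices since i strictly increases
def loopDiag (p0 p1 : List Int) (fuel i : Nat) (best : Nat × Nat) : Nat × Nat :=
  match fuel with
  | 0 => best
  | fuel + 1 =>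
    if i < p1.length then
      if (innerDiag p0 p1 p1.length i i (0, 0)).1.2 - (innerDiag p0 p1 p1.length i i (0, 0)).1.1 ≠ 0 then
        loopDiag p0 p1 fuel (innerDiag p0 p1 p1.length i i (0, 0)).2
          (if best.2 - best.1 < (innerDiag p0 p1 p1.length i i (0, 0)).1.2 - (innerDiag p0 p1 p1.length i i (0, 0)).1.1
           then (innerDiag p0 p1 p1.length i i (0, 0)).1 else best)
      else loopDiag p0 p1 fuel (i + 1) best
    else best

def scan_path (path : List (List Int)) : (List (String × List Int)) × List String × List Int :=
  let p0 := path.getD 0 []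
  let p1 := path.getD 1 []
  let otm := loopOtm p0 p0.length 0 (0, 0)
  let mto := loopOtm p1 p1.length 0 (0, 0)
  let dg := loopDiag p0 p1 p1.length 0 (0, 0)
  ([("one_to_many", [(otm.1 : Int), (otm.2 : Int)]),
    ("many_to_one", [(mto.1 : Int), (mto.2 : Int)]),
    ("diag_seq", [(dg.1 : Int), (dg.2 : Int)])],
   ["one_to_many", "many_to_one", "diag_seq"],
   [(otm.2 : Int) - (otm.1 : Int), (mto.2 : Int) - (mto.1 : Int), (dg.2 : Int) - (dg.1 : Int)])

-- ===== PORT B =====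
-- Source B runs(): one pass over k = 1 .. len-1 comparing seq[k] with seq[k-1]; ported as the
-- structural recursion over the remaining list carrying (prev, index k, run start, output)
def runsRec {α : Type} [DecidableEq α] (prev : α) (rest : List α) (k start : Nat)
    (out : List (Nat × Nat)) : List (Nat × Nat) :=
  match rest with
  | [] => out ++ [(start, k - start)]
  | x :: xs =>
    if x = prev then runsRec x xs (k + 1) start out
    else runsRec x xs (k + 1) k (out ++ [(start, k - start)])

def runsAlt {α : Type} [DecidableEq α] (seq : List α) : List (Nat × Nat) :=
  match seq with
  | [] => []
  | x :: xs => runsRec x xs 1 0 []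

-- fold body of Source B best_eq()
def otmF (best sl : Nat × Nat) : Nat × Nat :=
  if sl.2 - 1 > best.2 - best.1 then (sl.1, sl.1 + sl.2 - 1) else best

def bestEq (seq : List Int) : Nat × Nat :=
  (runsAlt seq).foldl otmF (0, 0)

def stepsOf (p0 p1 : List Int) : List Bool :=
  (List.range (p1.length - 1)).map
    (fun k => decide (p0.getD k 0 = p0.getD (k + 1) 0 - 1 ∧ p1.getD k 0 = p1.getD (k + 1) 0 - 1))

-- fold body of Source B's diag loop
def diagF (steps : List Bool) (best sl : Nat × Nat) : Nat × Nat :=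
  if steps.getD sl.1 false = true ∧ sl.2 > best.2 - best.1 then (sl.1, sl.1 + sl.2) else best

def bestDiag (steps : List Bool) : Nat × Nat :=
  (runsAlt steps).foldl (diagF steps) (0, 0)

def scan_path_alt (path : List (List Int)) : (List (String × List Int)) × List String × List Int :=
  let p0 := path.getD 0 []
  let p1 := path.getD 1 []
  let otm := bestEq p0
  let mto := bestEq p1
  let dg := bestDiag (stepsOf p0 p1)
  ([("one_to_many", [(otm.1 : Int), (otm.2 : Int)]),
    ("many_to_one", [(mto.1 : Int), (mto.2 : Int)]),
    ("diag_seq", [(dg.1 : Int), (dg.2 : Int)])],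
   ["one_to_many", "many_to_one", "diag_seq"],
   [(otm.2 : Int) - (otm.1 : Int), (mto.2 : Int) - (mto.1 : Int), (dg.2 : Int) - (dg.1 : Int)])

-- ===== PRECONDITION & SPEC =====
-- Pre_ excludes exactly the inputs on which Python A raises IndexError: paths with fewer than
-- two rows, and paths whose diagonal scan indexes path[0] past its end (len(path[1]) ≥ 2 and
-- len(path[0]) < len(path[1])); B raises on the same inputs.
def Pre_scan_path (path : List (List Int)) : Prop :=
  2 ≤ path.length ∧
    ((path.getD 1 []).length ≤ 1 ∨ (path.getD 1 []).length ≤ (path.getD 0 []).length)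
instance (path : List (List Int)) : Decidable (Pre_scan_path path) := by
  unfold Pre_scan_path; infer_instance

def pvWitness_scan_path : List (List Int) := [[0, 1, 1], [0, 0, 1]]

def Spec_scan_path (path : List (List Int)) (out : (List (String × List Int)) × List String × List Int) : Prop := out = scan_path_alt path
instance (path : List (List Int)) (out : (List (String × List Int)) × List String × List Int) : Decidable (Spec_scan_path path out) := by unfold Spec_scan_path; infer_instance

-- ===== CLAIM (what is proved, stated in full; the proofs are below) =====
def Claim_equal_scan_path : Prop := ∀ (path : List (List Int)), Dom_scan_path path → Pre_scan_path path → Spec_scan_path path (scan_path path)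

-- ===== LEMMAS AND PROOFS =====

-- length of the maximal run of values equal to q[i], probed from offset j (proof intermediary)
def runLen {α : Type} [DecidableEq α] (d : α) (q : List α) (i j : Nat) : Nat :=
  if i + j < q.length ∧ q.getD i d = q.getD (i + j) d then runLen d q i (j + 1) else j
termination_by q.length - (i + j)

theorem runLen_ge {α : Type} [DecidableEq α] (d : α) (q : List α) (i j : Nat) :
    j ≤ runLen d q i j := by
  fun_induction runLen d q i j with
  | case1 j h ih => omega
  | case2 j h => simp

-- the run decomposition of q starting at index i (proof intermediary)
def runsFrom {α : Type} [DecidableEq α] (d : α) (q : List α) (i : Nat) : List (Nat × Nat) :=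
  if i < q.length then (i, runLen d q i 1) :: runsFrom d q (i + runLen d q i 1) else []
termination_by q.length - i
decreasing_by have := runLen_ge d q i 1; omega

theorem innerOtm_eq (q : List Int) :
    ∀ (fuel i j : Nat) (cur : Nat × Nat), q.length ≤ i + j + fuel →
      innerOtm q fuel i j cur =
        (if j < runLen 0 q i j then (i, i + runLen 0 q i j - 1) else cur, runLen 0 q i j) := by
  intro fuel
  induction fuel with
  | zero =>
    intro i j cur h
    have hR : runLen 0 q i j = j := by
      rw [runLen, if_neg (fun hc => by omega)]
    rw [innerOtm, hR, if_neg (by omega)]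
  | succ fuel ih =>
    intro i j cur h
    rw [innerOtm]
    by_cases hc : i + j < q.length ∧ q.getD i 0 = q.getD (i + j) 0
    · rw [if_pos hc]
      have hR : runLen 0 q i j = runLen 0 q i (j + 1) := by rw [runLen, if_pos hc]
      have h1 := runLen_ge (0 : Int) q i (j + 1)
      rw [ih i (j + 1) (i, i + j) (by omega), hR]
      by_cases h2 : j + 1 < runLen 0 q i (j + 1)
      · rw [if_pos h2, if_pos (by omega)]
      · have h3 : runLen 0 q i (j + 1) = j + 1 := by omega
        rw [if_neg h2, if_pos (by omega), h3, show i + (j + 1) - 1 = i + j by omega]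
    · rw [if_neg hc]
      have hR : runLen 0 q i j = j := by rw [runLen, if_neg hc]
      rw [hR, if_neg (by omega)]

theorem loopOtm_foldl (q : List Int) :
    ∀ (fuel i : Nat) (best : Nat × Nat), q.length ≤ i + fuel →
      loopOtm q fuel i best = (runsFrom 0 q i).foldl otmF best := by
  intro fuel
  induction fuel with
  | zero =>
    intro i best h
    rw [loopOtm, runsFrom, if_neg (by omega), List.foldl_nil]
  | succ fuel ih =>
    intro i best h
    by_cases hi : i < q.length
    · have hge := runLen_ge (0 : Int) q i 1
      rw [loopOtm, if_pos hi, innerOtm_eq q q.length i 1 (0, 0) (by omega)]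
      by_cases h2 : 1 < runLen 0 q i 1
      · rw [if_pos h2]
        dsimp only
        rw [show i + runLen 0 q i 1 - 1 - i = runLen 0 q i 1 - 1 by omega]
        rw [if_pos (show runLen 0 q i 1 - 1 ≠ 0 by omega)]
        rw [ih (i + runLen 0 q i 1) _ (by omega)]
        conv_rhs => rw [runsFrom, if_pos hi]
        rw [List.foldl_cons]
        simp only [otmF]
      · rw [if_neg h2]
        dsimp only
        rw [if_neg (show ¬((0 : Nat) - 0 ≠ 0) by omega)]
        have hL1 : runLen 0 q i 1 = 1 := by omega
        rw [ih (i + 1) best (by omega)]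
        conv_rhs => rw [runsFrom, if_pos hi]
        rw [List.foldl_cons, hL1]
        simp [otmF]
    · rw [loopOtm, if_neg hi, runsFrom, if_neg hi, List.foldl_nil]

-- Source B's consecutive-comparison pass produces exactly the head-comparison run decomposition
theorem runsRec_spec {α : Type} [DecidableEq α] (d : α) (q : List α) :
    ∀ (rest : List α) (k start : Nat) (out : List (Nat × Nat)),
      rest = q.drop k → start < k → k ≤ q.length →
      (∀ t, start ≤ t → t < k → q.getD t d = q.getD start d) →
      runsRec (q.getD (k - 1) d) rest k start out =
        out ++ (start, runLen d q start (k - start)) ::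
          runsFrom d q (start + runLen d q start (k - start)) := by
  intro rest
  induction rest with
  | nil =>
    intro k start out hdrop hsk hkl hall
    have hk : k = q.length := by
      have := List.drop_eq_nil_iff.mp hdrop.symm
      omega
    rw [runsRec]
    have hrl : runLen d q start (k - start) = k - start := by
      rw [runLen, if_neg]
      intro ⟨hc, _⟩
      omega
    rw [hrl]
    have h1 : start + (k - start) = k := by omega
    rw [h1, runsFrom, if_neg (by omega)]
  | cons x xs ih =>
    intro k start out hdrop hsk hkl hall
    have hklt : k < q.length := by
      by_contra hc
      rw [List.drop_eq_nil_of_le (by omega)] at hdrop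
      exact List.cons_ne_nil x xs hdrop
    have hx : x = q.getD k d := by
      rw [List.drop_eq_getElem_cons hklt] at hdrop
      have := (List.cons_eq_cons.mp hdrop).1
      rw [this, List.getD, List.getElem?_eq_getElem hklt]
      rfl
    have hxs : xs = q.drop (k + 1) := by
      rw [List.drop_eq_getElem_cons hklt] at hdrop
      exact (List.cons_eq_cons.mp hdrop).2
    have hprev : q.getD (k - 1) d = q.getD start d := hall (k - 1) (by omega) (by omega)
    rw [runsRec]
    by_cases hcase : x = q.getD (k - 1) d
    · rw [if_pos hcase]
      have hks : q.getD k d = q.getD start d := by rw [← hx, hcase, hprev]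
      have hstep : runLen d q start (k - start) = runLen d q start (k - start + 1) := by
        rw [runLen, if_pos]
        constructor
        · omega
        · rw [show start + (k - start) = k by omega, hks]
      have h1 := ih (k + 1) start out hxs (by omega) (by omega)
        (by
          intro t ht1 ht2
          rcases Nat.lt_or_ge t k with hlt | hge'
          · exact hall t ht1 hlt
          · have ht : t = k := by omega
            rw [ht]
            exact hks)
      rw [show k + 1 - 1 = k by omega, ← hx] at h1
      rw [h1, show k + 1 - start = k - start + 1 by omega, ← hstep]
    · rw [if_neg hcase]
      have hks : ¬ q.getD start d = q.getD k d := by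
        intro hc
        exact hcase (by rw [hx, ← hc, hprev])
      have hrl : runLen d q start (k - start) = k - start := by
        rw [runLen, if_neg]
        intro ⟨_, hc⟩
        rw [show start + (k - start) = k by omega] at hc
        exact hks hc
      have h1 := ih (k + 1) k (out ++ [(start, k - start)]) hxs (by omega) (by omega)
        (fun t ht1 ht2 => congrArg (fun z => q.getD z d) (by omega : t = k))
      rw [show k + 1 - 1 = k by omega, ← hx, show k + 1 - k = 1 by omega] at h1
      rw [h1, hrl, show start + (k - start) = k by omega]
      conv_rhs => rw [runsFrom, if_pos hklt]
      simp

theorem runsAlt_eq {α : Type} [DecidableEq α] (d : α) (q : List α) :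
    runsAlt q = runsFrom d q 0 := by
  match q with
  | [] => rw [runsAlt, runsFrom, if_neg (by simp)]
  | x :: xs =>
    rw [runsAlt]
    have hs := runsRec_spec d (x :: xs) xs 1 0 []
      (by simp) (by omega) (by simp only [List.length_cons]; omega)
      (fun t ht1 ht2 => congrArg (fun z => (x :: xs).getD z d) (by omega : t = 0))
    rw [show (1 : Nat) - 1 = 0 from rfl, show ((x :: xs).getD 0 d) = x from rfl,
      show (1 : Nat) - 0 = 1 from rfl] at hs
    rw [hs, List.nil_append, Nat.zero_add]
    conv_rhs => rw [runsFrom, if_pos (by simp only [List.length_cons]; omega)]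
    rw [Nat.zero_add]

theorem bestEq_loopOtm (q : List Int) : loopOtm q q.length 0 (0, 0) = bestEq q := by
  rw [bestEq, runsAlt_eq (0 : Int) q, loopOtm_foldl q q.length 0 (0, 0) (by omega)]

-- ===== diag side =====

theorem getD_true_lt (b : List Bool) (j : Nat) (h : b.getD j false = true) : j < b.length := by
  by_contra hc
  rw [List.getD, List.getElem?_eq_none (by omega)] at h
  simp at h

-- extend j while the boolean list holds true at j (proof intermediary)
def boolExt (b : List Bool) (j : Nat) : Nat :=
  if h : b.getD j false = true then boolExt b (j + 1) else j
termination_by b.length - j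
decreasing_by have := getD_true_lt b j h; omega

theorem boolExt_ge (b : List Bool) (j : Nat) : j ≤ boolExt b j := by
  fun_induction boolExt b j with
  | case1 j h ih => omega
  | case2 j h => simp

theorem stepsOf_getD (p0 p1 : List Int) (j : Nat) :
    (stepsOf p0 p1).getD j false = true ↔
      (j + 1 < p1.length ∧ p0.getD j 0 = p0.getD (j + 1) 0 - 1 ∧
        p1.getD j 0 = p1.getD (j + 1) 0 - 1) := by
  rw [stepsOf, List.getD]
  by_cases h : j < p1.length - 1
  · rw [List.getElem?_eq_getElem (by simpa using h)]
    simp only [List.getElem_map, List.getElem_range, Option.getD_some]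
    constructor
    · intro hh
      exact ⟨by omega, of_decide_eq_true hh⟩
    · intro ⟨_, hh⟩
      exact decide_eq_true hh
  · rw [List.getElem?_eq_none (by simpa using h)]
    simp only [Option.getD_none]
    constructor
    · intro hh; simp at hh
    · intro ⟨hh, _⟩; omega

theorem stepsOf_length (p0 p1 : List Int) : (stepsOf p0 p1).length = p1.length - 1 := by
  simp [stepsOf]

theorem innerDiag_eq (p0 p1 : List Int) (i : Nat) :
    ∀ (fuel j : Nat) (cur : Nat × Nat), p1.length ≤ j + 1 + fuel →
      innerDiag p0 p1 fuel i j cur =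
        (if j < boolExt (stepsOf p0 p1) j then (i, boolExt (stepsOf p0 p1) j) else cur,
          boolExt (stepsOf p0 p1) j) := by
  intro fuel
  induction fuel with
  | zero =>
    intro j cur h
    have hb : ¬ (stepsOf p0 p1).getD j false = true := fun hc => by
      have := getD_true_lt _ _ hc
      rw [stepsOf_length] at this
      omega
    have hB : boolExt (stepsOf p0 p1) j = j := by rw [boolExt, dif_neg hb]
    rw [innerDiag, hB, if_neg (by omega)]
  | succ fuel ih =>
    intro j cur h
    rw [innerDiag]
    by_cases hc : j + 1 < p1.length ∧ p0.getD j 0 = p0.getD (j + 1) 0 - 1 ∧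
        p1.getD j 0 = p1.getD (j + 1) 0 - 1
    · rw [if_pos hc]
      have hb : (stepsOf p0 p1).getD j false = true := (stepsOf_getD p0 p1 j).mpr hc
      have hB : boolExt (stepsOf p0 p1) j = boolExt (stepsOf p0 p1) (j + 1) := by
        rw [boolExt, dif_pos hb]
      have h1 := boolExt_ge (stepsOf p0 p1) (j + 1)
      rw [ih (j + 1) (i, j + 1) (by omega), hB]
      by_cases h2 : j + 1 < boolExt (stepsOf p0 p1) (j + 1)
      · rw [if_pos h2, if_pos (by omega)]
      · have h3 : boolExt (stepsOf p0 p1) (j + 1) = j + 1 := by omega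
        rw [if_neg h2, if_pos (by omega), h3]
    · rw [if_neg hc]
      have hb : ¬ (stepsOf p0 p1).getD j false = true :=
        fun hcc => hc ((stepsOf_getD p0 p1 j).mp hcc)
      have hB : boolExt (stepsOf p0 p1) j = j := by rw [boolExt, dif_neg hb]
      rw [hB, if_neg (by omega)]

theorem boolExt_runLen (b : List Bool) (i : Nat) (hi : b.getD i false = true) :
    ∀ j, boolExt b (i + j) = i + runLen false b i j := by
  intro j
  fun_induction runLen false b i j with
  | case1 j h ih =>
    have ht : b.getD (i + j) false = true := by rw [← h.2, hi]
    rw [boolExt, dif_pos ht]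
    rw [show i + j + 1 = i + (j + 1) by omega]
    exact ih
  | case2 j h =>
    rw [boolExt, dif_neg]
    intro hc
    exact h ⟨getD_true_lt b (i + j) hc, by rw [hi, hc]⟩

-- a run-head equality shift: within an equal pair the probe can start one position later
theorem runLen_shift {α : Type} [DecidableEq α] (d : α) (q : List α) (i : Nat)
    (h : q.getD (i + 1) d = q.getD i d) :
    ∀ j, runLen d q (i + 1) j = runLen d q i (j + 1) - 1 := by
  intro j
  fun_induction runLen d q (i + 1) j with
  | case1 j hc ih =>
    rw [ih]
    have h5 : runLen d q i (j + 1) = runLen d q i (j + 1 + 1) := by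
      rw [runLen, if_pos]
      exact ⟨by omega, by rw [show i + (j + 1) = i + 1 + j by omega, ← hc.2, h]⟩
    rw [h5]
  | case2 j hc =>
    have h5 : runLen d q i (j + 1) = j + 1 := by
      rw [runLen, if_neg]
      intro ⟨h1, h2⟩
      exact hc ⟨by omega, by rw [h, h2, show i + (j + 1) = i + 1 + j by omega]⟩
    rw [h5]
    omega

theorem diag_false_step (b : List Bool) (i : Nat) (best : Nat × Nat)
    (hf : b.getD i false = false) :
    (runsFrom false b i).foldl (diagF b) best
      = (runsFrom false b (i + 1)).foldl (diagF b) best := by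
  by_cases hl : i < b.length
  · rw [runsFrom, if_pos hl, List.foldl_cons]
    have hge := runLen_ge false b i 1
    have hno : diagF b best (i, runLen false b i 1) = best := by
      rw [diagF]
      dsimp only
      rw [if_neg (fun hc => by rw [hf] at hc; exact Bool.false_ne_true hc.1)]
    rw [hno]
    by_cases h2 : 1 < runLen false b i 1
    · have hcond : i + 1 < b.length ∧ b.getD i false = b.getD (i + 1) false := by
        by_contra hc
        have : runLen false b i 1 = 1 := by rw [runLen, if_neg hc]
        omega
      have hf1 : b.getD (i + 1) false = false := by rw [← hcond.2, hf]
      have h4 : runLen false b i 1 = runLen false b i (1 + 1) := by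
        rw [runLen, if_pos hcond]
      have hsh : runLen false b (i + 1) 1 = runLen false b i 1 - 1 := by
        rw [runLen_shift false b i (by rw [hf1, hf]) 1, ← h4]
      conv_rhs => rw [runsFrom, if_pos hcond.1]
      rw [List.foldl_cons, hsh]
      have hno1 : diagF b best (i + 1, runLen false b i 1 - 1) = best := by
        rw [diagF]
        dsimp only
        rw [if_neg (fun hc => by rw [hf1] at hc; exact Bool.false_ne_true hc.1)]
      rw [hno1, show i + 1 + (runLen false b i 1 - 1) = i + runLen false b i 1 by omega]
    · have hL1 : runLen false b i 1 = 1 := by omega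
      rw [hL1]
  · rw [runsFrom, if_neg hl, runsFrom, if_neg (by omega)]

theorem loopDiag_foldl (p0 p1 : List Int) :
    ∀ (fuel i : Nat) (best : Nat × Nat), p1.length ≤ i + fuel →
      loopDiag p0 p1 fuel i best =
        (runsFrom false (stepsOf p0 p1) i).foldl (diagF (stepsOf p0 p1)) best := by
  intro fuel
  induction fuel with
  | zero =>
    intro i best h
    rw [loopDiag, runsFrom, if_neg (by rw [stepsOf_length]; omega), List.foldl_nil]
  | succ fuel ih =>
    intro i best h
    by_cases hi : i < p1.length
    · rw [loopDiag, if_pos hi, innerDiag_eq p0 p1 i p1.length i (0, 0) (by omega)]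
      have hge := boolExt_ge (stepsOf p0 p1) i
      by_cases h2 : i < boolExt (stepsOf p0 p1) i
      · rw [if_pos h2]
        dsimp only
        have htrue : (stepsOf p0 p1).getD i false = true := by
          by_contra hc
          have hE : boolExt (stepsOf p0 p1) i = i := by rw [boolExt, dif_neg hc]
          omega
        have hil := getD_true_lt (stepsOf p0 p1) i htrue
        have hge1 := runLen_ge false (stepsOf p0 p1) i 1
        have hEL : boolExt (stepsOf p0 p1) i = i + runLen false (stepsOf p0 p1) i 1 := by
          have h0 := boolExt_runLen (stepsOf p0 p1) i htrue 0
          rw [Nat.add_zero] at h0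
          rw [h0]
          congr 1
          rw [runLen, if_pos ⟨by omega, by rw [Nat.add_zero]⟩]
        rw [if_pos (show boolExt (stepsOf p0 p1) i - i ≠ 0 by omega)]
        rw [ih (boolExt (stepsOf p0 p1) i) _ (by omega)]
        conv_rhs => rw [runsFrom, if_pos hil]
        rw [List.foldl_cons, ← hEL]
        congr 1
        rw [diagF]
        dsimp only
        rw [← hEL]
        by_cases hb : best.2 - best.1 < boolExt (stepsOf p0 p1) i - i
        · rw [if_pos hb, if_pos ⟨htrue, by omega⟩]
        · rw [if_neg hb, if_neg (fun hcc => hb (by have := hcc.2; omega))]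
      · rw [if_neg h2]
        dsimp only
        rw [if_neg (show ¬((0 : Nat) - 0 ≠ 0) by omega)]
        have hfalse : (stepsOf p0 p1).getD i false = false := by
          by_contra hc
          have hc' : (stepsOf p0 p1).getD i false = true := by
            revert hc
            cases (stepsOf p0 p1).getD i false <;> simp
          have hE1 : boolExt (stepsOf p0 p1) i = boolExt (stepsOf p0 p1) (i + 1) := by
            rw [boolExt, dif_pos hc']
          have := boolExt_ge (stepsOf p0 p1) (i + 1)
          omega
        rw [ih (i + 1) best (by omega), ← diag_false_step (stepsOf p0 p1) i best hfalse]
    · rw [loopDiag, if_neg hi, runsFrom, if_neg (by rw [stepsOf_length]; omega),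
        List.foldl_nil]

theorem bestDiag_loopDiag (p0 p1 : List Int) :
    loopDiag p0 p1 p1.length 0 (0, 0) = bestDiag (stepsOf p0 p1) := by
  rw [bestDiag, runsAlt_eq false (stepsOf p0 p1),
    loopDiag_foldl p0 p1 p1.length 0 (0, 0) (by omega)]

theorem scan_path_eq (path : List (List Int)) : scan_path path = scan_path_alt path := by
  simp only [scan_path, scan_path_alt, bestEq_loopOtm, bestDiag_loopDiag]

-- ===== VERDICT (by name: the statement is the Claim_ definition above) =====
theorem scan_path_spec : Claim_equal_scan_path := by
  intro path _ _
  unfold Spec_scan_path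
  exact scan_path_eq path
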